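-- pv_equiv track=rewrite | github.com/castle-keep/traccer-perf-analysis | add_device.py | generate_alphanumeric_names
-- ===== SOURCE A (Python) =====
-- def generate_alphanumeric_names(range_length:int, existing_names:list[str]) -> set:
--     """
--     Generate 6 alphanumeric character combinations (0-9, A-Z).
--     """
--     chars = "0123456789ABCDEFGHIJKLMNOPQRSTUVWXYZ"
--     names = set()
--     i = 1
--     for i in range(36**6):
--         name = f"SIMU{''.join([chars[(i // (36**j)) % 36] for j in range(5)])}"
--         if name not in existing_names:
--             names.add(name)
--         if len(names) >= range_length:
--             break
--     return names
-- ===== SOURCE B (Python) =====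
-- def generate_alphanumeric_names(range_length: int, existing_names: list[str]) -> set:
--     """
--     Generate 6 alphanumeric character combinations (0-9, A-Z).
--     """
--     chars = "0123456789ABCDEFGHIJKLMNOPQRSTUVWXYZ"
--
--     def visit(n, tail, names):
--         # enumerate "SIMU" + s + tail for every n-char suffix s, the
--         # lowest position varying fastest; prune once enough names exist
--         if n == 0:
--             name = "SIMU" + tail
--             if name not in existing_names:
--                 names.add(name)
--             return names
--         for c in chars:
--             names = visit(n - 1, c + tail, names)
--             if len(names) >= range_length:
--                 break
--         return names
--
--     return visit(5, "", set())
-- ===== Notes on version B (the rewrite author's own statement) =====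
-- stated objective: alternative
-- what changed: Replaces A's flat loop over range(36**6) with per-index base-36 arithmetic decoding (f-string + join over a list comprehension) by a recursive descent over the five digit positions that builds each candidate suffix by string concatenation, pruning each loop level once enough names are collected; the redundant 36^6-36^5 iterations, which only re-emit names already in the set, disappear.
import Mathlib
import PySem

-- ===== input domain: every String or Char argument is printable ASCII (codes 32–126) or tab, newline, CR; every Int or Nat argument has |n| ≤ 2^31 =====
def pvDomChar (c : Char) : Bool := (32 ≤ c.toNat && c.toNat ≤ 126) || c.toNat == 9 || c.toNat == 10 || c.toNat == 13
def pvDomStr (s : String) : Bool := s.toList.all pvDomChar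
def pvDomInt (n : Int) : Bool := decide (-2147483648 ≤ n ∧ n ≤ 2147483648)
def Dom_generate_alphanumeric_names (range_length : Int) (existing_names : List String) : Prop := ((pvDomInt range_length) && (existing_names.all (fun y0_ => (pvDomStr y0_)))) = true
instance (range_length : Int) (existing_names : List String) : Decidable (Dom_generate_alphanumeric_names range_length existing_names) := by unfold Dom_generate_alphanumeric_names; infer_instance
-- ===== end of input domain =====

-- B replaces A's flat loop over range(36^6) with arithmetic digit decoding by a
-- recursive descent over the five digit positions that builds each candidate by
-- string concatenation (alternative decomposition; same resulting set, same order).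

-- ===== PORT A =====
-- chars = "0123456789ABCDEFGHIJKLMNOPQRSTUVWXYZ"
def pvCharsA : List Char := "0123456789ABCDEFGHIJKLMNOPQRSTUVWXYZ".toList

-- name = f"SIMU{''.join([chars[(i // (36**j)) % 36] for j in range(5)])}"  (i ≥ 0, so // and % are Nat / and %)
def pvNameA (i : Nat) : String := "SIMU" ++ String.mk ((List.range 5).map (fun j => pvCharsA[(i / 36 ^ j) % 36]!))

-- the for-loop over range(36**6) with its two ifs and the break (fuel = remaining iterations)
def pvLoopA (existing_names : List String) (range_length : Int) : Nat → Nat → PySem.Set String → PySem.Set String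
  | 0, _, names => names
  | fuel + 1, i, names =>
    let name := pvNameA i
    let names' := if existing_names.contains name then names else PySem.Set.add names name
    if range_length ≤ (names'.length : Int) then names' else pvLoopA existing_names range_length fuel (i + 1) names'

def generate_alphanumeric_names (range_length : Int) (existing_names : List String) : List String :=
  pvLoopA existing_names range_length (36 ^ 6) 0 PySem.Set.empty

-- ===== PORT B =====
-- the inner 'for c in chars: names = visit(n-1, c + tail, names); if len(names) >= range_length: break',
-- with visit at level n-1 passed in as a function
def pvForB (range_length : Int) (visitn : List Char → PySem.Set String → PySem.Set String) (tail : List Char) : List Char → PySem.Set String → PySem.Set String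
  | [], names => names
  | c :: cs, names =>
    let names' := visitn (c :: tail) names
    if range_length ≤ (names'.length : Int) then names' else pvForB range_length visitn tail cs names'

-- def visit(n, tail, names): …  (strings built by concatenation: tail is a List Char, c + tail is c :: tail)
def pvVisitB (existing_names : List String) (range_length : Int) : Nat → List Char → PySem.Set String → PySem.Set String
  | 0, tail, names =>
    let name := "SIMU" ++ String.mk tail
    if existing_names.contains name then names else PySem.Set.add names name
  | n + 1, tail, names => pvForB range_length (pvVisitB existing_names range_length n) tail pvCharsA names

def generate_alphanumeric_names_alt (range_length : Int) (existing_names : List String) : List String :=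
  pvVisitB existing_names range_length 5 [] PySem.Set.empty

-- ===== PRECONDITION & SPEC =====
def Spec_generate_alphanumeric_names (range_length : Int) (existing_names : List String) (out : List String) : Prop := out = generate_alphanumeric_names_alt range_length existing_names
instance (range_length : Int) (existing_names : List String) (out : List String) : Decidable (Spec_generate_alphanumeric_names range_length existing_names out) := by unfold Spec_generate_alphanumeric_names; infer_instance

-- ===== CLAIM (what is proved, stated in full; the proofs are below) =====
def Claim_equal_generate_alphanumeric_names : Prop := ∀ (range_length : Int) (existing_names : List String), Dom_generate_alphanumeric_names range_length existing_names → Spec_generate_alphanumeric_names range_length existing_names (generate_alphanumeric_names range_length existing_names)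

-- ===== LEMMAS AND PROOFS =====

-- a common abstraction of both programs: process an explicit list of candidate names
-- in order (add if fresh), breaking as soon as the set's size reaches range_length
def pvGLoop (existing_names : List String) (range_length : Int) : List String → PySem.Set String → PySem.Set String
  | [], s => s
  | n :: ns, s =>
    let s' := if existing_names.contains n then s else PySem.Set.add s n
    if range_length ≤ (s'.length : Int) then s' else pvGLoop existing_names range_length ns s'

lemma pvLoopA_eq_gloop (ex : List String) (rl : Int) :
    ∀ (fuel i : Nat) (s : PySem.Set String),
      pvLoopA ex rl fuel i s = pvGLoop ex rl ((List.range' i fuel).map pvNameA) s := by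
  intro fuel
  induction fuel with
  | zero => intro i s; rfl
  | succ fuel IH =>
    intro i s
    rw [List.range'_succ]
    simp only [pvLoopA, pvGLoop, List.map_cons]
    split <;>
      (split
       · rfl
       · exact IH (i + 1) _)

-- the candidate suffixes visit(n, tail, ·) runs through, in order
def pvCand : Nat → List Char → List (List Char)
  | 0, tail => [tail]
  | n + 1, tail => pvCharsA.flatMap (fun c => pvCand n (c :: tail))

def pvNameOf (t : List Char) : String := "SIMU" ++ String.mk t

lemma pvCand_ne_nil : ∀ (n : Nat) (tail : List Char), pvCand n tail ≠ [] := by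
  intro n
  induction n with
  | zero => intro tail h; simp [pvCand] at h
  | succ n IH =>
    intro tail h
    rw [pvCand, List.flatMap_eq_nil_iff] at h
    exact IH ('0' :: tail) (h '0' (by decide))

-- one-step unfolding of pvGLoop
lemma pvGLoop_cons (ex : List String) (rl : Int) (n : String) (ns : List String) (s : PySem.Set String) :
    pvGLoop ex rl (n :: ns) s =
      (if rl ≤ (((if ex.contains n then s else PySem.Set.add s n)).length : Int)
       then (if ex.contains n then s else PySem.Set.add s n)
       else pvGLoop ex rl ns (if ex.contains n then s else PySem.Set.add s n)) := rfl

-- splitting pvGLoop at a block boundary (the first block nonempty, so the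
-- break-after-each-candidate discipline is preserved)
lemma pvGLoop_append (ex : List String) (rl : Int) :
    ∀ (L1 L2 : List String) (s : PySem.Set String), L1 ≠ [] →
      pvGLoop ex rl (L1 ++ L2) s =
        (if rl ≤ ((pvGLoop ex rl L1 s).length : Int) then pvGLoop ex rl L1 s
         else pvGLoop ex rl L2 (pvGLoop ex rl L1 s)) := by
  intro L1
  induction L1 with
  | nil => intro L2 s h; exact absurd rfl h
  | cons x L1' IH =>
    intro L2 s _
    rw [List.cons_append, pvGLoop_cons ex rl x (L1' ++ L2) s, pvGLoop_cons ex rl x L1' s]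
    by_cases hg : rl ≤ (((if ex.contains x then s else PySem.Set.add s x)).length : Int)
    · rw [if_pos hg, if_pos hg, if_pos hg]
    · rw [if_neg hg, if_neg hg]
      rcases L1' with _ | ⟨y, L1''⟩
      · show pvGLoop ex rl ([] ++ L2) _ = _
        rw [List.nil_append]
        exact (if_neg hg).symm
      · exact IH L2 _ (by simp)

lemma pvForB_eq (ex : List String) (rl : Int) (n : Nat)
    (hvis : ∀ (tail : List Char) (s : PySem.Set String),
      pvVisitB ex rl n tail s = pvGLoop ex rl ((pvCand n tail).map pvNameOf) s) :
    ∀ (cs : List Char) (tail : List Char) (s : PySem.Set String),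
      pvForB rl (pvVisitB ex rl n) tail cs s
        = pvGLoop ex rl ((cs.flatMap (fun c => pvCand n (c :: tail))).map pvNameOf) s := by
  intro cs
  induction cs with
  | nil => intro tail s; rfl
  | cons c cs IH =>
    intro tail s
    rw [List.flatMap_cons, List.map_append]
    rw [pvGLoop_append ex rl _ _ s (by
      simp only [ne_eq, List.map_eq_nil_iff]
      exact pvCand_ne_nil n (c :: tail))]
    simp only [pvForB, hvis]
    split
    · rfl
    · exact IH tail _

lemma pvVisitB_eq (ex : List String) (rl : Int) :
    ∀ (n : Nat) (tail : List Char) (s : PySem.Set String),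
      pvVisitB ex rl n tail s = pvGLoop ex rl ((pvCand n tail).map pvNameOf) s := by
  intro n
  induction n with
  | zero =>
    intro tail s
    rw [pvCand]
    simp only [List.map_cons, List.map_nil, pvNameOf]
    rw [pvGLoop_cons]
    show _ = (if rl ≤ _ then _ else pvGLoop ex rl [] _)
    simp only [pvGLoop, ite_self]
    rfl
  | succ n IH =>
    intro tail s
    rw [pvVisitB, pvCand]
    exact pvForB_eq ex rl n IH pvCharsA tail s

-- digits of k, base 36, least significant first, as characters
def pvDigs : Nat → Nat → List Char
  | 0, _ => []
  | n + 1, k => pvCharsA[k % 36]! :: pvDigs n (k / 36)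

lemma pvRange_mul (a b : Nat) :
    List.range (a * b) = (List.range a).flatMap (fun q => (List.range b).map (fun r => q * b + r)) := by
  induction a with
  | zero => simp
  | succ a IH =>
    have h : (a + 1) * b = a * b + b := by ring
    rw [h, List.range_add, List.range_succ, List.flatMap_append, ← IH]
    simp

lemma pvDigs_split : ∀ (n q r : Nat), q < 36 → r < 36 ^ n →
    pvDigs (n + 1) (q * 36 ^ n + r) = pvDigs n r ++ [pvCharsA[q]!] := by
  intro n
  induction n with
  | zero =>
    intro q r hq hr
    interval_cases r
    simp only [pvDigs, pow_zero, mul_one, Nat.add_zero, List.nil_append]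
    rw [Nat.mod_eq_of_lt hq]
  | succ n IH =>
    intro q r hq hr
    have hpow : (36 : Nat) ^ (n + 1) = 36 * 36 ^ n := by ring
    have h1 : (q * 36 ^ (n + 1) + r) % 36 = r % 36 := by
      rw [hpow]
      have h : q * (36 * 36 ^ n) + r = r + q * 36 ^ n * 36 := by ring
      rw [h, Nat.add_mul_mod_self_right]
    have h2 : (q * 36 ^ (n + 1) + r) / 36 = q * 36 ^ n + r / 36 := by
      rw [hpow]
      have h : q * (36 * 36 ^ n) + r = r + q * 36 ^ n * 36 := by ring
      rw [h, Nat.add_mul_div_right _ _ (by norm_num : (0:Nat) < 36), Nat.add_comm]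
    have hdiv : r / 36 < 36 ^ n := by
      rw [Nat.div_lt_iff_lt_mul (by norm_num : (0:Nat) < 36)]
      omega
    calc pvDigs (n + 1 + 1) (q * 36 ^ (n + 1) + r)
        = pvCharsA[(q * 36 ^ (n + 1) + r) % 36]! :: pvDigs (n + 1) ((q * 36 ^ (n + 1) + r) / 36) := rfl
      _ = pvCharsA[r % 36]! :: pvDigs (n + 1) (q * 36 ^ n + r / 36) := by rw [h1, h2]
      _ = pvCharsA[r % 36]! :: (pvDigs n (r / 36) ++ [pvCharsA[q]!]) := by rw [IH q (r / 36) hq hdiv]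
      _ = pvDigs (n + 1) r ++ [pvCharsA[q]!] := rfl

lemma pvCharsA_as_range : pvCharsA = (List.range 36).map (fun q => pvCharsA[q]!) := by decide

lemma pvCand_eq : ∀ (n : Nat) (tail : List Char),
    pvCand n tail = (List.range (36 ^ n)).map (fun k => pvDigs n k ++ tail) := by
  intro n
  induction n with
  | zero => intro tail; simp [pvCand, pvDigs]
  | succ n IH =>
    intro tail
    have hpow : (36 : Nat) ^ (n + 1) = 36 * 36 ^ n := by ring
    rw [pvCand, hpow, pvRange_mul, List.map_flatMap]
    conv_lhs => rw [pvCharsA_as_range]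
    rw [List.flatMap_map]
    simp only [List.flatMap_def]
    congr 1
    apply List.map_congr_left
    intro q hq
    rw [List.mem_range] at hq
    rw [IH (pvCharsA[q]! :: tail), List.map_map]
    apply List.map_congr_left
    intro r hr
    rw [List.mem_range] at hr
    simp only [Function.comp_apply]
    rw [pvDigs_split n q r hq hr, List.append_assoc]
    rfl

lemma pvNameOf_digs (k : Nat) : pvNameOf (pvDigs 5 k) = pvNameA k := by
  unfold pvNameOf pvNameA
  congr 2
  show [pvCharsA[k % 36]!, pvCharsA[k / 36 % 36]!, pvCharsA[k / 36 / 36 % 36]!,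
        pvCharsA[k / 36 / 36 / 36 % 36]!, pvCharsA[k / 36 / 36 / 36 / 36 % 36]!] = _
  simp only [List.range_succ, List.range_zero, List.map, List.nil_append, List.cons_append, List.map_cons]
  norm_num [Nat.div_div_eq_div_mul]

-- B's candidate list is exactly the first 36^5 names of A's enumeration
lemma pvCandNames : (pvCand 5 []).map pvNameOf = (List.range' 0 (36 ^ 5)).map pvNameA := by
  rw [pvCand_eq, List.map_map, ← List.range_eq_range']
  apply List.map_congr_left
  intro k _
  simp only [Function.comp_apply, List.append_nil]
  exact pvNameOf_digs k

-- processing a name already seen (or excluded) is a no-op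
lemma pvGLoop_noop (ex : List String) (rl : Int) :
    ∀ (M : List String) (s : PySem.Set String), (∀ nm ∈ M, nm ∈ ex ∨ nm ∈ s) → pvGLoop ex rl M s = s := by
  intro M
  induction M with
  | nil => intro s _; rfl
  | cons n ns IH =>
    intro s h
    have hs' : (if ex.contains n then s else PySem.Set.add s n) = s := by
      rcases h n (by simp) with h1 | h1
      · rw [if_pos (by simpa using h1)]
      · split
        · rfl
        · simp [pysem, h1]
    simp only [pvGLoop, hs']
    split
    · rfl
    · exact IH s (fun nm hm => h nm (by simp [hm]))

lemma pvGLoop_absorb (ex : List String) (rl : Int) :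
    ∀ (L M : List String) (s : PySem.Set String),
      (∀ nm ∈ M, nm ∈ ex ∨ nm ∈ L ∨ nm ∈ s) →
      pvGLoop ex rl (L ++ M) s = pvGLoop ex rl L s := by
  intro L
  induction L with
  | nil =>
    intro M s h
    simp only [List.nil_append]
    exact pvGLoop_noop ex rl M s (fun nm hm => by
      rcases h nm hm with h1 | h1 | h1
      · exact Or.inl h1
      · simp at h1
      · exact Or.inr h1)
  | cons a L IH =>
    intro M s h
    simp only [List.cons_append, pvGLoop]
    have ha : ∀ nm ∈ M, nm ∈ ex ∨ nm ∈ L ∨ nm ∈ (if ex.contains a then s else PySem.Set.add s a) := by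
      intro nm hm
      rcases h nm hm with h1 | h1 | h1
      · exact Or.inl h1
      · rcases List.mem_cons.mp h1 with rfl | h2
        · by_cases hc : ex.contains nm = true
          · exact Or.inl (by simpa using hc)
          · right; right; rw [if_neg hc]; simp [pysem]
        · exact Or.inr (Or.inl h2)
      · right; right
        split
        · exact h1
        · simp [pysem, h1]
    by_cases hc : ex.contains a = true
    · simp only [if_pos hc] at ha ⊢
      split
      · rfl
      · exact IH M _ ha
    · simp only [if_neg hc] at ha ⊢
      split
      · rfl
      · exact IH M _ ha

-- nameA is periodic with period 36^5: iterations past 36^5 only re-emit earlier names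
lemma pvNameA_mod (i : Nat) : pvNameA i = pvNameA (i % 36 ^ 5) := by
  unfold pvNameA
  congr 2
  apply List.map_congr_left
  intro j hj
  simp only [List.mem_range] at hj
  congr 1
  interval_cases j <;> norm_num <;> omega

-- ===== VERDICT (by name: the statement is the Claim_ definition above) =====
theorem generate_alphanumeric_names_spec : Claim_equal_generate_alphanumeric_names := by
  intro rl ex _
  show generate_alphanumeric_names rl ex = generate_alphanumeric_names_alt rl ex
  unfold generate_alphanumeric_names generate_alphanumeric_names_alt
  rw [pvLoopA_eq_gloop, pvVisitB_eq, pvCandNames]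
  have hsplit : List.range' 0 (36 ^ 6) = List.range' 0 (36 ^ 5) ++ List.range' (36 ^ 5) (36 ^ 6 - 36 ^ 5) := by
    have := List.range'_append (s := 0) (m := 36 ^ 5) (n := 36 ^ 6 - 36 ^ 5) (step := 1)
    simp only [one_mul, Nat.zero_add] at this
    rw [this]
    norm_num
  rw [hsplit, List.map_append]
  apply pvGLoop_absorb
  intro nm hm
  simp only [List.mem_map] at hm
  obtain ⟨i, hi, rfl⟩ := hm
  refine Or.inr (Or.inl ?_)
  rw [pvNameA_mod i]
  exact List.mem_map.mpr ⟨i % 36 ^ 5, by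
    rw [List.mem_range'_1]
    constructor
    · omega
    · have : 0 < 36 ^ 5 := by norm_num
      omega, rfl⟩
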